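-- pv_equiv track=rewrite | github.com/RodolfoPSilva/Portfolio | World Hurricanes Analysis.py | mortality
-- ===== SOURCE A (Python) =====
-- def mortality(hurricanes):
--     mortality_rates = {0:[], 1:[], 2:[], 3:[], 4:[], 5:[]}
--     for hurricane in hurricanes:
--         rate = 0
--         deaths = hurricanes[hurricane]['Deaths']
--
--         if deaths == 0:
--             rate = 0
--         elif deaths > 0 and deaths <= 100:
--             rate = 1
--         elif deaths > 100 and deaths <= 500:
--             rate = 2
--         elif deaths > 500 and deaths <= 1000:
--             rate = 3
--         elif deaths > 1000 and deaths <= 10000: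
--             rate = 4
--         else:
--             rate = 5
--
--         if rate not in mortality_rates:
--             mortality_rates[rate] = hurricanes[hurricane]
--         else:
--             mortality_rates[rate].append(hurricanes[hurricane])
--     return mortality_rates
-- ===== SOURCE B (Python) =====
-- def mortality(hurricanes):
--     table = [(0, 100, 1), (100, 500, 2), (500, 1000, 3), (1000, 10000, 4)]
--
--     def rate(deaths):
--         if deaths == 0:
--             return 0
--         return next((r for lo, hi, r in table if lo < deaths <= hi), 5)
--
--     return {r: [h for h in hurricanes.values() if rate(h['Deaths']) == r]
--             for r in range(6)}
-- ===== Notes on version B (the rewrite author's own statement) =====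
-- stated objective: alternative
-- what changed: Replaces the single append-loop with an inline if/elif rate ladder by a data-driven (lower, upper, rate) threshold table queried with next(), and builds each of the six buckets by a filtering comprehension over the values instead of appending into a pre-seeded dict.
import Mathlib
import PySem

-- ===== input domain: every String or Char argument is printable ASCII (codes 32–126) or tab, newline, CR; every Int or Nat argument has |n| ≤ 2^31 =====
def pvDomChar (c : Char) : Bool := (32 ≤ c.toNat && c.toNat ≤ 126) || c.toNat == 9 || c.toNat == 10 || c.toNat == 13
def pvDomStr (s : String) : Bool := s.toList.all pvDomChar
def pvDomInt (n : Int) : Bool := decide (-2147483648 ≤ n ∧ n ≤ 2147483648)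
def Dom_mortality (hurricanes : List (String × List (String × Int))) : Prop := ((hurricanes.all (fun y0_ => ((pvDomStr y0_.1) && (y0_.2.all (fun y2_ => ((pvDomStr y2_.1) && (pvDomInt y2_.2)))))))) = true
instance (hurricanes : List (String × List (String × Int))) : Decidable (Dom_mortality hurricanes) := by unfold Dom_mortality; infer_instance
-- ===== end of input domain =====

-- B replaces A's single append loop with its if/elif ladder by a data-driven threshold
-- table and one filtering pass per bucket (objective: alternative decomposition; no speed claim).

-- ===== PORT A =====
-- A's inline if/elif ladder computing the rate from the death count.
def rateA (deaths : Int) : Int :=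
  if deaths = 0 then 0
  else if 0 < deaths ∧ deaths ≤ 100 then 1
  else if 100 < deaths ∧ deaths ≤ 500 then 2
  else if 500 < deaths ∧ deaths ≤ 1000 then 3
  else if 1000 < deaths ∧ deaths ≤ 10000 then 4
  else 5

def mortality (hurricanes : List (String × List (String × Int))) : List (Int × List (List (String × Int))) :=
  (hurricanes.foldl
    (fun md pair =>
      -- hurricanes[hurricane] (the loop iterates the keys, so the key is always present)
      let hval := (PySem.Dict.get? (PySem.Dict.mk hurricanes) pair.1).getD []
      -- hval['Deaths']; the KeyError when 'Deaths' is absent is excluded by Pre_mortality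
      let deaths := (PySem.Dict.get? (PySem.Dict.mk hval) "Deaths").getD 0
      let rate := rateA deaths
      if md.contains rate = false then
        md   -- Python assigns a dict where a list is expected; unreachable (rate ∈ 0..5, all pre-seeded) and untypable, ported as identity
      else
        md.modify rate [] (fun l => l ++ [hval]))
    (PySem.Dict.mk [(0,[]),(1,[]),(2,[]),(3,[]),(4,[]),(5,[])])).items

-- ===== PORT B =====
-- B's threshold table and rate function: next((r for lo, hi, r in table if lo < d <= hi), 5)
def rateB (deaths : Int) : Int :=
  if deaths = 0 then 0
  else ((([(0,100,1),(100,500,2),(500,1000,3),(1000,10000,4)] : List (Int × Int × Int)).find?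
          (fun t => decide (t.1 < deaths) && decide (deaths ≤ t.2.1))).map (·.2.2)).getD 5

-- {r: [h for h in hurricanes.values() if rate(h['Deaths']) == r] for r in range(6)}
def mortality_alt (hurricanes : List (String × List (String × Int))) : List (Int × List (List (String × Int))) :=
  (PySem.List.pyRange 0 6 1).map (fun r =>
    (r, ((PySem.Dict.mk hurricanes).values).filter
          (fun h => rateB ((PySem.Dict.get? (PySem.Dict.mk h) "Deaths").getD 0) == r)))

-- ===== PRECONDITION & SPEC =====
-- Pre_ excludes (i) association lists with duplicate hurricane names, which no Python dict can
-- present (the dict encoding makes them an artefact: A's key lookup would re-read the first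
-- entry), and (ii) hurricanes without a 'Deaths' key, on which both A and B raise KeyError.
def Pre_mortality (hurricanes : List (String × List (String × Int))) : Prop :=
  (hurricanes.map (·.1)).Nodup ∧ ∀ p ∈ hurricanes, "Deaths" ∈ p.2.map (·.1)

instance (hurricanes : List (String × List (String × Int))) : Decidable (Pre_mortality hurricanes) := by
  unfold Pre_mortality; infer_instance

def pvWitness_mortality : (List (String × List (String × Int))) :=
  [("Camille", [("Deaths", 259)]), ("Mitch", [("Deaths", 19325)]), ("Ida", [("Deaths", 0)])]

def Spec_mortality (hurricanes : List (String × List (String × Int))) (out : List (Int × List (List (String × Int)))) : Prop := out = mortality_alt hurricanes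
instance (hurricanes : List (String × List (String × Int))) (out : List (Int × List (List (String × Int)))) : Decidable (Spec_mortality hurricanes out) := by unfold Spec_mortality; infer_instance

-- ===== CLAIM (what is proved, stated in full; the proofs are below) =====
def Claim_equal_mortality : Prop := ∀ (hurricanes : List (String × List (String × Int))), Dom_mortality hurricanes → Pre_mortality hurricanes → Spec_mortality hurricanes (mortality hurricanes)

-- ===== LEMMAS AND PROOFS =====

theorem rateA_eq_rateB (d : Int) : rateA d = rateB d := by
  unfold rateA rateB
  by_cases h0 : d = 0
  · simp [h0]
  · by_cases h1 : 0 < d ∧ d ≤ 100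
    · simp [List.find?, h0, h1.1, h1.2]
    · by_cases h2 : 100 < d ∧ d ≤ 500
      · simp [List.find?, h0, h2.1, h2.2, show ¬(d ≤ 100) by omega]
      · by_cases h3 : 500 < d ∧ d ≤ 1000
        · simp [List.find?, h0, h3.1, h3.2, show ¬(d ≤ 100) by omega,
                show ¬(d ≤ 500) by omega]
        · by_cases h4 : 1000 < d ∧ d ≤ 10000
          · simp [List.find?, h0, h4.1, h4.2, show ¬(d ≤ 100) by omega,
                  show ¬(d ≤ 500) by omega, show ¬(d ≤ 1000) by omega]
          · by_cases hneg : d < 0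
            · simp [List.find?, h0, show ¬(0 < d) by omega,
                    show ¬(100 < d) by omega, show ¬(500 < d) by omega, show ¬(1000 < d) by omega]
            · simp [List.find?, h0, show ¬(d ≤ 100) by omega,
                    show ¬(d ≤ 500) by omega, show ¬(d ≤ 1000) by omega, show ¬(d ≤ 10000) by omega]
theorem rateA_cases (d : Int) :
    rateA d = 0 ∨ rateA d = 1 ∨ rateA d = 2 ∨ rateA d = 3 ∨ rateA d = 4 ∨ rateA d = 5 := by
  unfold rateA; split_ifs <;> simp

theorem bucket_loop (vs : List (Int × List (String × Int)))
    (hv : ∀ p ∈ vs, p.1 = 0 ∨ p.1 = 1 ∨ p.1 = 2 ∨ p.1 = 3 ∨ p.1 = 4 ∨ p.1 = 5)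
    (a0 a1 a2 a3 a4 a5 : List (List (String × Int))) :
    (vs.foldl
      (fun md p =>
        if md.contains p.1 = false then md else md.modify p.1 [] (fun l => l ++ [p.2]))
      (PySem.Dict.mk [(0,a0),(1,a1),(2,a2),(3,a3),(4,a4),(5,a5)])).items
    = [(0, a0 ++ (vs.filter (fun p => p.1 == 0)).map (·.2)),
       (1, a1 ++ (vs.filter (fun p => p.1 == 1)).map (·.2)),
       (2, a2 ++ (vs.filter (fun p => p.1 == 2)).map (·.2)),
       (3, a3 ++ (vs.filter (fun p => p.1 == 3)).map (·.2)),
       (4, a4 ++ (vs.filter (fun p => p.1 == 4)).map (·.2)),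
       (5, a5 ++ (vs.filter (fun p => p.1 == 5)).map (·.2))] := by
  induction vs generalizing a0 a1 a2 a3 a4 a5 with
  | nil => simp
  | cons p t ih =>
    obtain ⟨r, v⟩ := p
    have hrest : ∀ q ∈ t, q.1 = 0 ∨ q.1 = 1 ∨ q.1 = 2 ∨ q.1 = 3 ∨ q.1 = 4 ∨ q.1 = 5 :=
      fun q hq => hv q (List.mem_cons_of_mem _ hq)
    rcases hv (r, v) List.mem_cons_self with hr | hr | hr | hr | hr | hr <;> subst hr
    · rw [List.foldl_cons]
      have hstep : (fun (md : PySem.Dict Int (List (List (String × Int)))) (p : Int × List (String × Int)) =>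
          if md.contains p.1 = false then md else md.modify p.1 [] (fun l => l ++ [p.2]))
          (PySem.Dict.mk [(0,a0),(1,a1),(2,a2),(3,a3),(4,a4),(5,a5)]) (0, v)
          = PySem.Dict.mk [(0, a0 ++ [v]), (1, a1), (2, a2), (3, a3), (4, a4), (5, a5)] := by
        simp [PySem.Dict.contains, PySem.Dict.modify, PySem.Dict.get?, PySem.Dict.getD, PySem.Dict.insert]
      simp only [hstep]; rw [ih hrest]
      simp
    · rw [List.foldl_cons]
      have hstep : (fun (md : PySem.Dict Int (List (List (String × Int)))) (p : Int × List (String × Int)) =>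
          if md.contains p.1 = false then md else md.modify p.1 [] (fun l => l ++ [p.2]))
          (PySem.Dict.mk [(0,a0),(1,a1),(2,a2),(3,a3),(4,a4),(5,a5)]) (1, v)
          = PySem.Dict.mk [(0, a0), (1, a1 ++ [v]), (2, a2), (3, a3), (4, a4), (5, a5)] := by
        simp [PySem.Dict.contains, PySem.Dict.modify, PySem.Dict.get?, PySem.Dict.getD, PySem.Dict.insert]
      simp only [hstep]; rw [ih hrest]
      simp
    · rw [List.foldl_cons]
      have hstep : (fun (md : PySem.Dict Int (List (List (String × Int)))) (p : Int × List (String × Int)) =>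
          if md.contains p.1 = false then md else md.modify p.1 [] (fun l => l ++ [p.2]))
          (PySem.Dict.mk [(0,a0),(1,a1),(2,a2),(3,a3),(4,a4),(5,a5)]) (2, v)
          = PySem.Dict.mk [(0, a0), (1, a1), (2, a2 ++ [v]), (3, a3), (4, a4), (5, a5)] := by
        simp [PySem.Dict.contains, PySem.Dict.modify, PySem.Dict.get?, PySem.Dict.getD, PySem.Dict.insert]
      simp only [hstep]; rw [ih hrest]
      simp
    · rw [List.foldl_cons]
      have hstep : (fun (md : PySem.Dict Int (List (List (String × Int)))) (p : Int × List (String × Int)) =>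
          if md.contains p.1 = false then md else md.modify p.1 [] (fun l => l ++ [p.2]))
          (PySem.Dict.mk [(0,a0),(1,a1),(2,a2),(3,a3),(4,a4),(5,a5)]) (3, v)
          = PySem.Dict.mk [(0, a0), (1, a1), (2, a2), (3, a3 ++ [v]), (4, a4), (5, a5)] := by
        simp [PySem.Dict.contains, PySem.Dict.modify, PySem.Dict.get?, PySem.Dict.getD, PySem.Dict.insert]
      simp only [hstep]; rw [ih hrest]
      simp
    · rw [List.foldl_cons]
      have hstep : (fun (md : PySem.Dict Int (List (List (String × Int)))) (p : Int × List (String × Int)) =>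
          if md.contains p.1 = false then md else md.modify p.1 [] (fun l => l ++ [p.2]))
          (PySem.Dict.mk [(0,a0),(1,a1),(2,a2),(3,a3),(4,a4),(5,a5)]) (4, v)
          = PySem.Dict.mk [(0, a0), (1, a1), (2, a2), (3, a3), (4, a4 ++ [v]), (5, a5)] := by
        simp [PySem.Dict.contains, PySem.Dict.modify, PySem.Dict.get?, PySem.Dict.getD, PySem.Dict.insert]
      simp only [hstep]; rw [ih hrest]
      simp
    · rw [List.foldl_cons]
      have hstep : (fun (md : PySem.Dict Int (List (List (String × Int)))) (p : Int × List (String × Int)) =>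
          if md.contains p.1 = false then md else md.modify p.1 [] (fun l => l ++ [p.2]))
          (PySem.Dict.mk [(0,a0),(1,a1),(2,a2),(3,a3),(4,a4),(5,a5)]) (5, v)
          = PySem.Dict.mk [(0, a0), (1, a1), (2, a2), (3, a3), (4, a4), (5, a5 ++ [v])] := by
        simp [PySem.Dict.contains, PySem.Dict.modify, PySem.Dict.get?, PySem.Dict.getD, PySem.Dict.insert]
      simp only [hstep]; rw [ih hrest]
      simp

theorem main (hs : List (String × List (String × Int))) (hnd : (hs.map (·.1)).Nodup) :
    (hs.foldl
      (fun md pair =>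
        let hval := (PySem.Dict.get? (PySem.Dict.mk hs) pair.1).getD []
        let deaths := (PySem.Dict.get? (PySem.Dict.mk hval) "Deaths").getD 0
        let rate := rateA deaths
        if md.contains rate = false then md else md.modify rate [] (fun l => l ++ [hval]))
      (PySem.Dict.mk [(0,[]),(1,[]),(2,[]),(3,[]),(4,[]),(5,[])])).items
    = (PySem.List.pyRange 0 6 1).map (fun r =>
        (r, ((PySem.Dict.mk hs).values).filter
              (fun h => rateB ((PySem.Dict.get? (PySem.Dict.mk h) "Deaths").getD 0) == r))) := by
  have hlook : ∀ pair ∈ hs, (PySem.Dict.get? (PySem.Dict.mk hs) pair.1).getD [] = pair.2 := by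
    intro pair hp
    have := PySem.Dict.get?_of_mem_items (d := PySem.Dict.mk hs) (k := pair.1) (v := pair.2)
      (by simpa using hp) (by simpa using hnd)
    simp [this]
  have hcongr := PySem.List.foldl_congr_mem (l := hs)
    (init := PySem.Dict.mk [(0,[]),(1,[]),(2,[]),(3,[]),(4,[]),(5,[])])
    (f := fun md pair =>
        let hval := (PySem.Dict.get? (PySem.Dict.mk hs) pair.1).getD []
        let deaths := (PySem.Dict.get? (PySem.Dict.mk hval) "Deaths").getD 0
        let rate := rateA deaths
        if md.contains rate = false then md else md.modify rate [] (fun l => l ++ [hval]))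
    (g := fun md pair =>
        (fun (md : PySem.Dict Int (List (List (String × Int)))) (p : Int × List (String × Int)) =>
          if md.contains p.1 = false then md else md.modify p.1 [] (fun l => l ++ [p.2]))
          md ((fun (pair : String × List (String × Int)) =>
            (rateA ((PySem.Dict.get? (PySem.Dict.mk pair.2) "Deaths").getD 0), pair.2)) pair))
    (by intro acc x hx; simp only [hlook x hx])
  have hmem : ∀ p ∈ hs.map (fun (pair : String × List (String × Int)) =>
      (rateA ((PySem.Dict.get? (PySem.Dict.mk pair.2) "Deaths").getD 0), pair.2)),
      p.1 = 0 ∨ p.1 = 1 ∨ p.1 = 2 ∨ p.1 = 3 ∨ p.1 = 4 ∨ p.1 = 5 := by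
    intro p hp
    simp only [List.mem_map] at hp
    obtain ⟨a, _, hb⟩ := hp
    rw [← hb]
    exact rateA_cases _
  have hfm := (List.foldl_map
    (f := fun (pair : String × List (String × Int)) =>
      (rateA ((PySem.Dict.get? (PySem.Dict.mk pair.2) "Deaths").getD 0), pair.2))
    (g := fun (md : PySem.Dict Int (List (List (String × Int)))) (p : Int × List (String × Int)) =>
      if md.contains p.1 = false then md else md.modify p.1 [] (fun l => l ++ [p.2]))
    (l := hs)
    (init := PySem.Dict.mk [(0,[]),(1,[]),(2,[]),(3,[]),(4,[]),(5,[])])).symm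
  rw [hcongr, hfm, bucket_loop _ hmem]
  have h6 : PySem.List.pyRange 0 6 1 = [0, 1, 2, 3, 4, 5] := by decide
  simp [h6, List.filter_map, List.map_map, Function.comp_def, rateA_eq_rateB, PySem.Dict.values]

-- ===== VERDICT (by name: the statement is the Claim_ definition above) =====
theorem mortality_spec : Claim_equal_mortality := by
  intro hs _ hpre
  unfold Spec_mortality mortality mortality_alt
  exact main hs hpre.1
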